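-- pv_equiv track=rewrite | github.com/maso27/AdventOfCode_2024 | Day12/_Archive/01_fencing_whoopsDiagonal.py | find_plots
-- ===== SOURCE A (Python) =====
-- def find_plots(map_in):
--     plots_list = []
--     for y, row in enumerate(map_in[1:-1], start=1): # everything but borders
--         for x, spot in enumerate(row[1:-1], start=1): # everything but borders
--             is_in_plot = False
--             for plot in plots_list:
--                 for yy in range(y-1, y+2): # check 1 down and 1 up
--                     for xx in range(x-1, x+2): # check 1 left and 1 right
--                         if map_in[y][x] == map_in[yy][xx] and [xx,yy] in plot:
--                             plot.append([x,y])
--                             is_in_plot = True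
--                             break
--                     if is_in_plot:
--                         break
--                 if is_in_plot:
--                     break
--             if not is_in_plot:
--                 plots_list.append([[x,y]])
--     return plots_list
-- ===== SOURCE B (Python) =====
-- def find_plots(map_in):
--     plots = []
--     idx = {}  # (x, y) -> index of the plot that contains [x, y]
--     for y in range(1, len(map_in) - 1):
--         row = map_in[y]
--         for x in range(1, len(row) - 1):
--             c = map_in[y][x]
--             cands = []
--             for nx, ny in ((x - 1, y - 1), (x, y - 1), (x + 1, y - 1), (x - 1, y)):
--                 i = idx.get((nx, ny))
--                 if i is not None and map_in[ny][nx] == c: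
--                     cands.append(i)
--             if cands:
--                 i = min(cands)
--                 plots[i].append([x, y])
--             else:
--                 i = len(plots)
--                 plots.append([[x, y]])
--             idx[(x, y)] = i
--     return plots
-- ===== Notes on version B (the rewrite author's own statement) =====
-- stated objective: faster
-- what changed: A rescans every existing plot (and each plot's whole member list) with a 3x3 window for every cell; B keeps a coordinate-to-plot-index dictionary and, per cell, looks up only the four already-processed neighbours, appending to the minimum matching plot index, removing the inner scan over plots entirely; a timing run measured B faster at every generated size.
-- outside the precondition, e.g. on find_plots(['aaa', 'aaa', 'a', 'aaa']): A returns [[[1, 1]]], B returns [[[1, 1]]]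
import Mathlib
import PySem

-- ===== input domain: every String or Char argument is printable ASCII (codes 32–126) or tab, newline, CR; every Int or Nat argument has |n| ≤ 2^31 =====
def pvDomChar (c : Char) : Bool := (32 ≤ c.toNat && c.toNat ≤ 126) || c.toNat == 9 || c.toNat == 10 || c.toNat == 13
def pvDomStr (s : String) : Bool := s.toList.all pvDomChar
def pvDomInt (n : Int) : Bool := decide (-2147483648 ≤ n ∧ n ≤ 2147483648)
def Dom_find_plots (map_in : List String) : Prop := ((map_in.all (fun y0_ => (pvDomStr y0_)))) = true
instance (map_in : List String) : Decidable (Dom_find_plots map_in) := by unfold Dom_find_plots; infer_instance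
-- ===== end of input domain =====

-- B replaces A's scan of every plot for every cell by a coordinate→plot-index dictionary,
-- appending each cell to the minimum-index plot owning a matching earlier neighbour
-- (objective: faster; a timing run measured B faster at every generated size).

-- ===== PORT A =====
-- Rows are converted to char lists once; grid indexing uses getD, which is exact on Pre_
-- (inputs where Python's map_in[yy][xx] raises IndexError are excluded by Pre_find_plots).
def pvChar (g : List (List Char)) (y x : Nat) : Char := (g.getD y []).getD x (Char.ofNat 0)

-- the 'for yy …: for xx …:' scan of one plot; the break flag is the `any`
def pvHitA (g : List (List Char)) (y x : Nat) (plot : List (List Int)) : Bool :=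
  (List.range' (y - 1) 3).any fun yy =>
    (List.range' (x - 1) 3).any fun xx =>
      pvChar g y x == pvChar g yy xx && plot.contains [(xx : Int), (yy : Int)]

-- 'for plot in plots_list: … plot.append([x,y]); break' — returns the updated list and is_in_plot
def pvPlaceA (g : List (List Char)) (y x : Nat) :
    List (List (List Int)) → List (List (List Int)) × Bool
  | [] => ([], false)
  | p :: ps =>
    if pvHitA g y x p then ((p ++ [[(x : Int), (y : Int)]]) :: ps, true)
    else
      let r := pvPlaceA g y x ps
      (p :: r.1, r.2)

-- one inner-loop body: if not is_in_plot, plots_list.append([[x,y]])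
def pvStepA (g : List (List Char)) (y : Nat) (st : List (List (List Int))) (x : Nat) :
    List (List (List Int)) :=
  let r := pvPlaceA g y x st
  if r.2 then r.1 else r.1 ++ [[[(x : Int), (y : Int)]]]

def find_plots (map_in : List String) : List (List (List Int)) :=
  let g := map_in.map String.toList
  (List.range' 1 (g.length - 2)).foldl
    (fun st y => (List.range' 1 ((g.getD y []).length - 2)).foldl (pvStepA g y) st) []

-- ===== PORT B =====
-- Source B's loop body: look up the four already-processed neighbours in the dict, keep the
-- matching ones' plot indices, append [x,y] to the min-index plot (or start a new plot).
def pvStepB (g : List (List Char)) (y : Nat)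
    (st : List (List (List Int)) × PySem.Dict (Nat × Nat) Nat) (x : Nat) :
    List (List (List Int)) × PySem.Dict (Nat × Nat) Nat :=
  let c := pvChar g y x
  let cands := ([(x - 1, y - 1), (x, y - 1), (x + 1, y - 1), (x - 1, y)] : List (Nat × Nat)).filterMap
    (fun q =>
      match st.2.get? q with
      | some i => if pvChar g q.2 q.1 == c then some i else none
      | none => none)
  match cands.min? with
  | some i => (st.1.modify i (· ++ [[(x : Int), (y : Int)]]), st.2.insert (x, y) i)
  | none => (st.1 ++ [[[(x : Int), (y : Int)]]], st.2.insert (x, y) st.1.length)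

def find_plots_alt (map_in : List String) : List (List (List Int)) :=
  let g := map_in.map String.toList
  ((List.range' 1 (g.length - 2)).foldl
    (fun st y => (List.range' 1 ((g.getD y []).length - 2)).foldl (pvStepB g y) st)
    ([], PySem.Dict.empty)).1

-- ===== PRECONDITION & SPEC =====
-- Pre_ excludes ragged grids in which some row with interior cells has a neighbouring row
-- shorter than itself: there Python A's 3x3 lookup map_in[yy][xx] can raise IndexError
-- (on a few such grids A still returns because the scan breaks off early — see the cite).
def Pre_find_plots (map_in : List String) : Prop :=
  ∀ y, y < map_in.length → 1 ≤ y → y + 1 < map_in.length →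
    3 ≤ (map_in.getD y "").toList.length →
      ∀ d ∈ [y - 1, y, y + 1],
        (map_in.getD y "").toList.length ≤ (map_in.getD d "").toList.length
instance (map_in : List String) : Decidable (Pre_find_plots map_in) := by
  unfold Pre_find_plots; infer_instance
def pvWitness_find_plots : List String := ["aaa", "aba", "aaa"]

def Spec_find_plots (map_in : List String) (out : List (List (List Int))) : Prop :=
  out = find_plots_alt map_in
instance (map_in : List String) (out : List (List (List Int))) : Decidable (Spec_find_plots map_in out) := by
  unfold Spec_find_plots; infer_instance

-- ===== CLAIM (what is proved, stated in full; the proofs are below) =====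
def Claim_equal_find_plots : Prop := ∀ (map_in : List String), Dom_find_plots map_in → Pre_find_plots map_in → Spec_find_plots map_in (find_plots map_in)

-- ===== LEMMAS AND PROOFS =====

def pvInter (g : List (List Char)) (py px : Nat) : Prop :=
  1 ≤ py ∧ py + 1 < g.length ∧ 1 ≤ px ∧ px + 1 < (g.getD py []).length
def pvBefore (y x py px : Nat) : Prop := py < y ∨ (py = y ∧ px < x)
def pvInv (g : List (List Char)) (y x : Nat)
    (st : List (List (List Int)) × PySem.Dict (Nat × Nat) Nat) : Prop :=
  (∀ (px py : Nat) (i : Nat), (i < st.1.length ∧ [(px : Int), (py : Int)] ∈ st.1.getD i []) ↔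
      st.2.get? (px, py) = some i) ∧
  (∀ (px py : Nat), (st.2.get? (px, py)).isSome ↔ (pvInter g py px ∧ pvBefore y x py px))

lemma pvPlaceA_eq (g : List (List Char)) (y x : Nat) (ps : List (List (List Int))) :
    pvPlaceA g y x ps =
      if ps.findIdx (pvHitA g y x) < ps.length
      then (ps.modify (ps.findIdx (pvHitA g y x)) (· ++ [[(x : Int), (y : Int)]]), true)
      else (ps, false) := by
  induction ps with
  | nil => simp [pvPlaceA]
  | cons p ps ih =>
    by_cases hp : pvHitA g y x p
    · simp [pvPlaceA, hp, List.findIdx_cons]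
    · simp only [pvPlaceA, hp, if_false, ih, List.findIdx_cons, Bool.false_eq_true,
        cond_false, List.length_cons]
      by_cases h : ps.findIdx (pvHitA g y x) < ps.length
      · simp [h, Nat.succ_lt_succ h, List.modify]
      · simp [h]

lemma pvFindIdx_eq_min (ps : List (List (List Int))) (p : List (List Int) → Bool) (S : List Nat)
    (hmem : ∀ i, i < ps.length → (p (ps.getD i []) = true ↔ i ∈ S))
    (hlt : ∀ i ∈ S, i < ps.length) :
    ps.findIdx p = (S.min?).getD ps.length := by
  rcases hS : S.min? with _ | m
  · rw [List.min?_eq_none_iff] at hS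
    subst hS
    simp only [Option.getD_none]
    rw [List.findIdx_eq_length]
    intro a ha
    obtain ⟨i, hi, rfl⟩ := List.mem_iff_getElem.mp ha
    by_contra hpa
    have := (hmem i hi).mp (by simpa [List.getD_eq_getElem?_getD, List.getElem?_eq_getElem hi] using (by simpa using hpa))
    simp at this
  · rw [List.min?_eq_some_iff] at hS
    obtain ⟨hmS, hmin⟩ := hS
    have hmlt : m < ps.length := hlt m hmS
    simp only [Option.getD_some]
    rw [List.findIdx_eq hmlt]
    constructor
    · have := (hmem m hmlt).mpr hmS
      simpa [List.getD_eq_getElem?_getD, List.getElem?_eq_getElem hmlt] using this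
    · intro j hj
      by_contra hpj
      have hjlt : j < ps.length := Nat.lt_trans hj hmlt
      have : j ∈ S := (hmem j hjlt).mp (by simpa [List.getD_eq_getElem?_getD, List.getElem?_eq_getElem hjlt] using (by simpa using hpj))
      exact absurd (hmin j this) (by omega)


lemma pvHit_iff (g : List (List Char)) (y' x' : Nat)
    (st : List (List (List Int)) × PySem.Dict (Nat × Nat) Nat)
    (hInv : pvInv g (y' + 1) (x' + 1) st) (i : Nat) (hi : i < st.1.length) :
    pvHitA g (y' + 1) (x' + 1) (st.1.getD i []) = true ↔
      ∃ q ∈ ([(x', y'), (x' + 1, y'), (x' + 2, y'), (x', y' + 1)] : List (Nat × Nat)),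
        st.2.get? q = some i ∧ pvChar g q.2 q.1 = pvChar g (y' + 1) (x' + 1) := by
  obtain ⟨hM, hK⟩ := hInv
  have hmem : ∀ (px py : Nat), ([(px : Int), (py : Int)] ∈ st.1.getD i []) ↔
      st.2.get? (px, py) = some i := by
    intro px py
    constructor
    · intro h; exact (hM px py i).mp ⟨hi, h⟩
    · intro h; exact ((hM px py i).mpr h).2
  have hnone : ∀ (px py : Nat), ¬ pvBefore (y' + 1) (x' + 1) py px →
      ¬ ([(px : Int), (py : Int)] ∈ st.1.getD i []) := by
    intro px py hb hmem'
    have h1 := (hmem px py).mp hmem'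
    have : (st.2.get? (px, py)).isSome := by simp [h1]
    exact hb ((hK px py).mp this).2
  have hr3 : ∀ a : Nat, List.range' a 3 = [a, a + 1, a + 2] := fun a => rfl
  simp only [pvHitA, Nat.add_sub_cancel, hr3, List.any_cons, List.any_nil,
    Bool.or_eq_true, Bool.and_eq_true, beq_iff_eq, List.contains_eq_mem, decide_eq_true_eq,
    List.mem_cons, List.not_mem_nil, Bool.false_eq_true, or_false]
  constructor
  · rintro ((⟨hc, hm⟩ | ⟨hc, hm⟩ | ⟨hc, hm⟩) | (⟨hc, hm⟩ | ⟨-, hm⟩ | ⟨hc, hm⟩) |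
      (⟨hc, hm⟩ | ⟨hc, hm⟩ | ⟨hc, hm⟩))
    · exact ⟨(x', y'), by simp, (hmem _ _).mp hm, hc.symm⟩
    · exact ⟨(x' + 1, y'), by simp, (hmem _ _).mp hm, hc.symm⟩
    · exact ⟨(x' + 2, y'), by simp, (hmem _ _).mp hm, hc.symm⟩
    · exact ⟨(x', y' + 1), by simp, (hmem _ _).mp hm, hc.symm⟩
    · exact absurd hm (hnone _ _ (by unfold pvBefore; omega))
    · exact absurd hm (hnone _ _ (by unfold pvBefore; omega))
    · exact absurd hm (hnone _ _ (by unfold pvBefore; omega))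
    · exact absurd hm (hnone _ _ (by unfold pvBefore; omega))
    · exact absurd hm (hnone _ _ (by unfold pvBefore; omega))
  · rintro ⟨q, hq4, hq, hc⟩
    rcases hq4 with rfl | rfl | rfl | rfl
    · exact Or.inl (Or.inl ⟨hc.symm, (hmem _ _).mpr hq⟩)
    · exact Or.inl (Or.inr (Or.inl ⟨hc.symm, (hmem _ _).mpr hq⟩))
    · exact Or.inl (Or.inr (Or.inr ⟨hc.symm, (hmem _ _).mpr hq⟩))
    · exact Or.inr (Or.inl (Or.inl ⟨hc.symm, (hmem _ _).mpr hq⟩))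

lemma pvStep_key (g : List (List Char)) (y x : Nat)
    (st : List (List (List Int)) × PySem.Dict (Nat × Nat) Nat)
    (hInt : pvInter g y x) (hInv : pvInv g y x st) :
    pvStepA g y st.1 x = (pvStepB g y st x).1 ∧ pvInv g y (x + 1) (pvStepB g y st x) := by
  obtain ⟨hy1, hy2, hx1, hx2⟩ := hInt
  obtain ⟨y', rfl⟩ : ∃ y'', y = y'' + 1 := ⟨y - 1, by omega⟩
  obtain ⟨x', rfl⟩ : ∃ x'', x = x'' + 1 := ⟨x - 1, by omega⟩
  have hM := hInv.1
  have hK := hInv.2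
  set c := pvChar g (y' + 1) (x' + 1) with hc
  set S : List Nat := ([(x', y'), (x' + 1, y'), (x' + 2, y'), (x', y' + 1)] : List (Nat × Nat)).filterMap
    (fun q =>
      match st.2.get? q with
      | some i => if pvChar g q.2 q.1 == c then some i else none
      | none => none) with hS
  -- membership in the candidate list
  have hf : ∀ (q : Nat × Nat) (i : Nat),
      (match st.2.get? q with
        | some j => if pvChar g q.2 q.1 == c then some j else none
        | none => none) = some i ↔ (st.2.get? q = some i ∧ pvChar g q.2 q.1 = c) := by
    intro q i
    rcases h : st.2.get? q with _ | j
    · simp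
    · by_cases hcc : pvChar g q.2 q.1 = c <;> simp [hcc]
  have hSmem : ∀ i : Nat, i ∈ S ↔
      ∃ q ∈ ([(x', y'), (x' + 1, y'), (x' + 2, y'), (x', y' + 1)] : List (Nat × Nat)),
        st.2.get? q = some i ∧ pvChar g q.2 q.1 = c := by
    intro i
    rw [hS, List.mem_filterMap]
    constructor
    · rintro ⟨q, hql, hqf⟩; exact ⟨q, hql, (hf q i).mp hqf⟩
    · rintro ⟨q, hql, hqf⟩; exact ⟨q, hql, (hf q i).mpr hqf⟩
  have hlt : ∀ i ∈ S, i < st.1.length := by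
    intro i hi
    obtain ⟨q, _, hq, _⟩ := (hSmem i).mp hi
    rcases q with ⟨qx, qy⟩
    exact ((hM qx qy i).mpr hq).1
  have hmem : ∀ i, i < st.1.length →
      (pvHitA g (y' + 1) (x' + 1) (st.1.getD i []) = true ↔ i ∈ S) := by
    intro i hi
    rw [pvHit_iff g y' x' st hInv i hi, hSmem]
  have hfind : st.1.findIdx (pvHitA g (y' + 1) (x' + 1)) = (S.min?).getD st.1.length :=
    pvFindIdx_eq_min st.1 _ S hmem hlt
  -- the cell being processed is in no plot yet
  have hxy_none : st.2.get? (x' + 1, y' + 1) = none := by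
    rcases h : st.2.get? (x' + 1, y' + 1) with _ | j
    · rfl
    · have : (st.2.get? (x' + 1, y' + 1)).isSome := by simp [h]
      have hb := ((hK _ _).mp this).2
      unfold pvBefore at hb; omega
  have hxy_notmem : ∀ j, ¬ ([((x' + 1 : Nat) : Int), ((y' + 1 : Nat) : Int)] ∈ st.1.getD j []) := by
    intro j hj
    by_cases hjl : j < st.1.length
    · have := (hM (x' + 1) (y' + 1) j).mp ⟨hjl, hj⟩
      rw [hxy_none] at this; simp at this
    · rw [List.getD_eq_getElem?_getD, List.getElem?_eq_none (by omega)] at hj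
      simp at hj
  -- unfold both steps
  have hstepB : pvStepB g (y' + 1) st (x' + 1) =
      match S.min? with
      | some i => (st.1.modify i (· ++ [((x' + 1 : Nat) : Int), ((y' + 1 : Nat) : Int)] :: []),
          st.2.insert (x' + 1, y' + 1) i)
      | none => (st.1 ++ [[[((x' + 1 : Nat) : Int), ((y' + 1 : Nat) : Int)]]],
          st.2.insert (x' + 1, y' + 1) st.1.length) := by
    simp only [pvStepB, Nat.add_sub_cancel, ← hc, ← hS]
  have hBefore_succ : ∀ (py px : Nat), (px, py) ≠ (x' + 1, y' + 1) →
      (pvBefore (y' + 1) (x' + 2) py px ↔ pvBefore (y' + 1) (x' + 1) py px) := by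
    intro py px hne
    have h2 : ¬(px = x' + 1 ∧ py = y' + 1) := by simpa [Prod.ext_iff] using hne
    unfold pvBefore; omega
  rcases hmin : S.min? with _ | m
  · -- no matching neighbour: a new plot is appended on both sides
    rw [hstepB, hmin]
    have hstA : pvStepA g (y' + 1) st.1 (x' + 1) =
        st.1 ++ [[((x' + 1 : Nat) : Int), ((y' + 1 : Nat) : Int)] :: []] := by
      unfold pvStepA
      rw [pvPlaceA_eq, hfind, hmin]
      simp
    have hgetapp : ∀ j : Nat,
        (st.1 ++ [[((x' + 1 : Nat) : Int), ((y' + 1 : Nat) : Int)] :: []]).getD j [] =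
          if j < st.1.length then st.1.getD j []
          else if j = st.1.length then [((x' + 1 : Nat) : Int), ((y' + 1 : Nat) : Int)] :: [] else [] := by
      intro j
      rcases Nat.lt_trichotomy j st.1.length with h | h | h
      · rw [List.getD_eq_getElem?_getD, List.getElem?_append_left h, if_pos h,
          List.getD_eq_getElem?_getD]
      · subst h
        rw [List.getD_eq_getElem?_getD, List.getElem?_append_right (le_refl _), if_neg (by omega),
          if_pos rfl]
        simp
      · rw [List.getD_eq_getElem?_getD, List.getElem?_eq_none (by simp; omega), if_neg (by omega),
          if_neg (by omega)]
        rfl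
    refine ⟨hstA, ?_, ?_⟩
    · -- membership ↔ dict
      intro px py j
      rw [PySem.Dict.get?_insert, hgetapp, List.length_append]
      by_cases hpq : (px, py) = (x' + 1, y' + 1)
      · obtain ⟨rfl, rfl⟩ : px = x' + 1 ∧ py = y' + 1 := by simpa [Prod.ext_iff] using hpq
        rw [if_pos hpq]
        constructor
        · rintro ⟨hj, hmem'⟩
          by_cases hjl : j < st.1.length
          · rw [if_pos hjl] at hmem'
            exact absurd hmem' (hxy_notmem j)
          · have hje : j = st.1.length := by simp at hj; omega
            exact congrArg some hje.symm
        · intro h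
          have hje : j = st.1.length := by simpa using h.symm
          subst hje
          refine ⟨by simp, ?_⟩
          rw [if_neg (by omega), if_pos rfl]
          simp
      · rw [if_neg hpq]
        have hmemne : ¬ ([(px : Int), (py : Int)] = [((x' + 1 : Nat) : Int), ((y' + 1 : Nat) : Int)]) := by
          simp only [List.cons.injEq, and_true, Nat.cast_inj]
          intro hcon
          exact hpq (by simp [Prod.ext_iff]; omega)
        constructor
        · rintro ⟨hj, hmem'⟩
          by_cases hjl : j < st.1.length
          · rw [if_pos hjl] at hmem'
            exact (hM px py j).mp ⟨hjl, hmem'⟩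
          · by_cases hje : j = st.1.length
            · rw [if_neg hjl, if_pos hje] at hmem'
              simp only [List.mem_cons, List.not_mem_nil, or_false] at hmem'
              exact absurd hmem' hmemne
            · rw [if_neg hjl, if_neg hje] at hmem'
              simp at hmem'
        · intro h
          have h2 := (hM px py j).mpr h
          refine ⟨by simp; omega, ?_⟩
          rw [if_pos h2.1]
          exact h2.2
    · -- dict domain
      intro px py
      rw [PySem.Dict.get?_insert]
      by_cases hpq : (px, py) = (x' + 1, y' + 1)
      · obtain ⟨rfl, rfl⟩ : px = x' + 1 ∧ py = y' + 1 := by simpa [Prod.ext_iff] using hpq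
        rw [if_pos hpq]
        simp only [Option.isSome_some, true_iff]
        exact ⟨⟨by omega, hy2, by omega, hx2⟩, Or.inr ⟨rfl, by omega⟩⟩
      · rw [if_neg hpq, hK px py]
        rw [hBefore_succ py px hpq]
  · -- matching neighbour(s): append to the minimum-index plot on both sides
    have hm_lt : m < st.1.length := hlt m (List.min?_mem hmin)
    rw [hstepB, hmin]
    have hstA : pvStepA g (y' + 1) st.1 (x' + 1) =
        st.1.modify m (· ++ [((x' + 1 : Nat) : Int), ((y' + 1 : Nat) : Int)] :: []) := by
      unfold pvStepA
      rw [pvPlaceA_eq, hfind, hmin]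
      simp [hm_lt]
    have hgetmod : ∀ j : Nat,
        (st.1.modify m (· ++ [((x' + 1 : Nat) : Int), ((y' + 1 : Nat) : Int)] :: [])).getD j [] =
          if j = m then st.1.getD m [] ++ [((x' + 1 : Nat) : Int), ((y' + 1 : Nat) : Int)] :: []
          else st.1.getD j [] := by
      intro j
      by_cases hj : j = m
      · subst hj
        rw [List.getD_eq_getElem?_getD, List.getElem?_modify, List.getElem?_eq_getElem hm_lt,
          if_pos rfl]
        simp [List.getD_eq_getElem?_getD, List.getElem?_eq_getElem hm_lt]
      · have hmj : ¬ m = j := fun h => hj h.symm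
        rw [List.getD_eq_getElem?_getD, List.getElem?_modify, if_neg hj,
          List.getD_eq_getElem?_getD]
        rcases h : st.1[j]? with _ | v
        · rfl
        · simp [hmj]
    refine ⟨hstA, ?_, ?_⟩
    · intro px py j
      rw [PySem.Dict.get?_insert, hgetmod, List.length_modify]
      by_cases hpq : (px, py) = (x' + 1, y' + 1)
      · obtain ⟨rfl, rfl⟩ : px = x' + 1 ∧ py = y' + 1 := by simpa [Prod.ext_iff] using hpq
        rw [if_pos hpq]
        constructor
        · rintro ⟨hj, hmem'⟩
          by_cases hje : j = m
          · exact congrArg some hje.symm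
          · rw [if_neg hje] at hmem'
            exact absurd hmem' (hxy_notmem j)
        · intro h
          have hje : j = m := by simpa using h.symm
          subst hje
          refine ⟨hm_lt, ?_⟩
          rw [if_pos rfl]
          simp
      · rw [if_neg hpq]
        have hmemne : ¬ ([(px : Int), (py : Int)] = [((x' + 1 : Nat) : Int), ((y' + 1 : Nat) : Int)]) := by
          simp only [List.cons.injEq, and_true, Nat.cast_inj]
          intro hcon
          exact hpq (by simp [Prod.ext_iff]; omega)
        by_cases hje : j = m
        · subst hje
          rw [if_pos rfl]
          have hmm : ([(px : Int), (py : Int)] ∈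
              st.1.getD j [] ++ [((x' + 1 : Nat) : Int), ((y' + 1 : Nat) : Int)] :: []) ↔
              [(px : Int), (py : Int)] ∈ st.1.getD j [] := by
            simp only [List.mem_append, List.mem_cons, List.not_mem_nil, or_false]
            constructor
            · rintro (h | h)
              · exact h
              · exact absurd h hmemne
            · exact Or.inl
          rw [and_congr_right (fun _ => hmm)]
          exact hM px py j
        · rw [if_neg hje]
          exact hM px py j
    · intro px py
      rw [PySem.Dict.get?_insert]
      by_cases hpq : (px, py) = (x' + 1, y' + 1)
      · obtain ⟨rfl, rfl⟩ : px = x' + 1 ∧ py = y' + 1 := by simpa [Prod.ext_iff] using hpq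
        rw [if_pos hpq]
        simp only [Option.isSome_some, true_iff]
        exact ⟨⟨by omega, hy2, by omega, hx2⟩, Or.inr ⟨rfl, by omega⟩⟩
      · rw [if_neg hpq, hK px py]
        rw [hBefore_succ py px hpq]

lemma pvRow (g : List (List Char)) (y : Nat) (hy1 : 1 ≤ y) (hy2 : y + 1 < g.length) :
    ∀ (k x0 : Nat) (st : List (List (List Int)) × PySem.Dict (Nat × Nat) Nat),
      1 ≤ x0 → x0 + k ≤ (g.getD y []).length - 1 → pvInv g y x0 st →
      (List.range' x0 k).foldl (pvStepA g y) st.1 =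
        ((List.range' x0 k).foldl (pvStepB g y) st).1 ∧
      pvInv g y (x0 + k) ((List.range' x0 k).foldl (pvStepB g y) st) := by
  intro k
  induction k with
  | zero => intro x0 st _ _ hInv; exact ⟨rfl, hInv⟩
  | succ k ih =>
    intro x0 st hx0 hbound hInv
    have hInt : pvInter g y x0 := ⟨hy1, hy2, hx0, by omega⟩
    obtain ⟨heq, hinv'⟩ := pvStep_key g y x0 st hInt hInv
    rw [List.range'_succ, List.foldl_cons, List.foldl_cons, heq]
    have := ih (x0 + 1) (pvStepB g y st x0) (by omega) (by omega) hinv'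
    rw [show x0 + 1 + k = x0 + (k + 1) by omega] at this
    exact this

lemma pvInv_next_row (g : List (List Char)) (y : Nat)
    (st : List (List (List Int)) × PySem.Dict (Nat × Nat) Nat)
    (h : pvInv g y (1 + ((g.getD y []).length - 2)) st) : pvInv g (y + 1) 1 st := by
  refine ⟨h.1, fun px py => ?_⟩
  rw [h.2 px py]
  constructor
  · rintro ⟨hI, hB⟩
    exact ⟨hI, by unfold pvBefore at *; omega⟩
  · rintro ⟨hI, hB⟩
    refine ⟨hI, ?_⟩
    by_cases hpy : py = y
    · subst hpy
      obtain ⟨h1, h2, h3, h4⟩ := hI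
      unfold pvBefore at *
      omega
    · obtain ⟨h1, h2, h3, h4⟩ := hI
      unfold pvBefore at *
      omega

lemma pvGrid (g : List (List Char)) :
    ∀ (k y0 : Nat) (st : List (List (List Int)) × PySem.Dict (Nat × Nat) Nat),
      1 ≤ y0 → y0 + k ≤ g.length - 1 → pvInv g y0 1 st →
      (List.range' y0 k).foldl
          (fun s y => (List.range' 1 ((g.getD y []).length - 2)).foldl (pvStepA g y) s) st.1 =
        ((List.range' y0 k).foldl
          (fun s y => (List.range' 1 ((g.getD y []).length - 2)).foldl (pvStepB g y) s) st).1 ∧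
      pvInv g (y0 + k) 1
        ((List.range' y0 k).foldl
          (fun s y => (List.range' 1 ((g.getD y []).length - 2)).foldl (pvStepB g y) s) st) := by
  intro k
  induction k with
  | zero => intro y0 st _ _ hInv; exact ⟨rfl, hInv⟩
  | succ k ih =>
    intro y0 st hy0 hbound hInv
    have hy2 : y0 + 1 < g.length := by omega
    have hrow : (List.range' 1 ((g.getD y0 []).length - 2)).foldl (pvStepA g y0) st.1 =
          ((List.range' 1 ((g.getD y0 []).length - 2)).foldl (pvStepB g y0) st).1 ∧
        pvInv g y0 (1 + ((g.getD y0 []).length - 2))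
          ((List.range' 1 ((g.getD y0 []).length - 2)).foldl (pvStepB g y0) st) := by
      by_cases hL : 3 ≤ (g.getD y0 []).length
      · exact pvRow g y0 hy0 hy2 ((g.getD y0 []).length - 2) 1 st (le_refl 1) (by omega) hInv
      · have h0 : (g.getD y0 []).length - 2 = 0 := by omega
        refine ⟨by rw [h0]; rfl, ?_⟩
        rw [h0]
        simpa using hInv
    have hnext := pvInv_next_row g y0 _ hrow.2
    rw [List.range'_succ, List.foldl_cons, List.foldl_cons, hrow.1]
    have := ih (y0 + 1) _ (by omega) (by omega) hnext
    rw [show y0 + 1 + k = y0 + (k + 1) by omega] at this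
    exact this

lemma pvInv_init (g : List (List Char)) : pvInv g 1 1 ([], PySem.Dict.empty) := by
  constructor
  · intro px py i
    simp [PySem.Dict.get?_empty]
  · intro px py
    simp only [PySem.Dict.get?_empty, Option.isSome_none, Bool.false_eq_true, false_iff]
    rintro ⟨hI, hB⟩
    obtain ⟨h1, _, h3, _⟩ := hI
    unfold pvBefore at hB
    omega

lemma pvMain (map_in : List String) : find_plots map_in = find_plots_alt map_in := by
  unfold find_plots find_plots_alt
  dsimp only
  by_cases h3 : 3 ≤ (map_in.map String.toList).length
  · have := pvGrid (map_in.map String.toList) ((map_in.map String.toList).length - 2) 1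
      ([], PySem.Dict.empty) (le_refl 1) (by omega) (pvInv_init _)
    exact this.1
  · have h0 : (map_in.map String.toList).length - 2 = 0 := by omega
    rw [h0]
    rfl

-- ===== VERDICT (by name: the statement is the Claim_ definition above) =====
theorem find_plots_spec : Claim_equal_find_plots := by
  intro map_in _ _
  unfold Spec_find_plots
  exact pvMain map_in
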